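-- pv_equiv track=rewrite | github.com/gmpommier/sujet | sujet2.py | positif
-- ===== SOURCE A (Python) =====
-- def positif(pile):
--     pile_1 = list(pile)
--     pile_2 = []
--     while pile_1 != []:
--         x = pile_1.pop()
--         if x >= 0:
--             pile_2.append(x)
--     while pile_2 != []:
--         x = pile_2.pop()
--         pile_1.append(x)
--     return pile_1
-- ===== SOURCE B (Python) =====
-- def positif(pile):
--     return [x for x in pile if x >= 0]
-- ===== Notes on version B (the rewrite author's own statement) =====
-- stated objective: simpler
-- what changed: A filters while popping the stack into a reversed intermediate stack and then pops that back to restore order; B is a single forward-order comprehension with no intermediate container.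
import Mathlib
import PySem

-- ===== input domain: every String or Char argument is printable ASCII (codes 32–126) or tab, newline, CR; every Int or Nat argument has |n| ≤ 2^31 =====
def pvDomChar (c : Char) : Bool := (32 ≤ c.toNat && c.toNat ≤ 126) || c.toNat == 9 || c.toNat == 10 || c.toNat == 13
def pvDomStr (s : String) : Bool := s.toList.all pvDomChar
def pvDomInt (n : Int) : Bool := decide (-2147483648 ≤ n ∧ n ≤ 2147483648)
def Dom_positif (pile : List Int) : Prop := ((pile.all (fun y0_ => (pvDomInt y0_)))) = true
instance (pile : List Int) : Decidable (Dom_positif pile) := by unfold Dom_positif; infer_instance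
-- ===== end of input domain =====

-- B replaces A's two reversing stack passes (filter while popping, then pop back to restore order)
-- by a single forward filter pass; objective: simpler.

-- ===== PORT A =====
-- while pile_1 != []: x = pile_1.pop(); if x >= 0: pile_2.append(x)
def positifLoop1 (p1 p2 : List Int) : List Int :=
  match h : PySem.List.pop? p1 (-1) with
  | none => p2
  | some (x, rest) => positifLoop1 rest (if x ≥ 0 then p2 ++ [x] else p2)
termination_by p1.length
decreasing_by
  have h2 := PySem.List.length_of_pop?_eq_some _ h
  simp only [] at h2
  omega

-- while pile_2 != []: x = pile_2.pop(); pile_1.append(x)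
def positifLoop2 (p2 p1 : List Int) : List Int :=
  match h : PySem.List.pop? p2 (-1) with
  | none => p1
  | some (x, rest) => positifLoop2 rest (p1 ++ [x])
termination_by p2.length
decreasing_by
  have h2 := PySem.List.length_of_pop?_eq_some _ h
  simp only [] at h2
  omega

def positif (pile : List Int) : List Int :=
  positifLoop2 (positifLoop1 pile []) []

-- ===== PORT B =====
def positif_alt (pile : List Int) : List Int :=
  pile.filter (fun x => decide (x ≥ 0))

-- ===== PRECONDITION & SPEC =====
def Spec_positif (pile : List Int) (out : List Int) : Prop := out = positif_alt pile
instance (pile : List Int) (out : List Int) : Decidable (Spec_positif pile out) := by unfold Spec_positif; infer_instance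

-- ===== CLAIM (what is proved, stated in full; the proofs are below) =====
def Claim_equal_positif : Prop := ∀ (pile : List Int), Dom_positif pile → Spec_positif pile (positif pile)

-- ===== LEMMAS AND PROOFS =====
theorem positifLoop1_eq (p1 p2 : List Int) :
    positifLoop1 p1 p2 = p2 ++ (p1.filter (fun x => decide (x ≥ 0))).reverse := by
  induction p1 using List.reverseRecOn generalizing p2 with
  | nil =>
      unfold positifLoop1
      split
      · simp
      · rename_i x rest h
        exact absurd h (by simp [PySem.List.pop?, PySem.List.pyIdx?])
  | append_singleton xs x ih =>
      unfold positifLoop1; rw [PySem.List.pop?_last]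
      simp only [ih, List.filter_append, List.filter_cons, List.filter_nil, List.reverse_append]
      by_cases hx : x ≥ 0 <;> simp [hx]

theorem positifLoop2_eq (p2 p1 : List Int) :
    positifLoop2 p2 p1 = p1 ++ p2.reverse := by
  induction p2 using List.reverseRecOn generalizing p1 with
  | nil =>
      unfold positifLoop2
      split
      · simp
      · rename_i x rest h
        exact absurd h (by simp [PySem.List.pop?, PySem.List.pyIdx?])
  | append_singleton xs x ih =>
      unfold positifLoop2; rw [PySem.List.pop?_last]
      simp [ih]

-- ===== VERDICT (by name: the statement is the Claim_ definition above) =====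
theorem positif_spec : Claim_equal_positif := by
  intro pile _
  unfold Spec_positif positif positif_alt
  rw [positifLoop1_eq, positifLoop2_eq]
  simp
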